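-- pv_equiv track=rewrite | github.com/DongHyunByun/algorithm_practice | search/[프로그래머스]게임맵최단거리.py | solution
-- ===== SOURCE A (Python) =====
-- from collections import deque
--
-- dR=[0,0,-1,1]
--
-- dC=[1,-1,0,0]
--
-- def solution(maps):
--     N=len(maps)
--     M=len(maps[0])
--
--     visited=[[-1 for j in range(M)] for i in range(N)]
--     visited[0][0]=1
--     q=deque([[0,0]])
--     ans=-1
--     while(q):
--         r,c=q.popleft()
--         if r==N-1 and c==M-1:
--             ans=visited[r][c]
--             break
--         for k in range(4):
--             tempR=r+dR[k]
--             tempC=c+dC[k]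
--             if 0<=tempR<N and 0<=tempC<M and visited[tempR][tempC]==-1 and maps[tempR][tempC]==1:
--                 visited[tempR][tempC]=visited[r][c]+1
--                 q.append([tempR,tempC])
--
--     return ans
-- ===== SOURCE B (Python) =====
-- def solution(maps):
--     N = len(maps)
--     M = len(maps[0])
--     goal = (N - 1, M - 1)
--     seen = {(0, 0)}
--     frontier = [(0, 0)]
--     dist = 1
--     while frontier:
--         if goal in frontier:
--             return dist
--         nxt = []
--         for r, c in frontier:
--             for tr, tc in ((r, c + 1), (r, c - 1), (r - 1, c), (r + 1, c)):
--                 if 0 <= tr < N and 0 <= tc < M and (tr, tc) not in seen and maps[tr][tc] == 1: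
--                     seen.add((tr, tc))
--                     nxt.append((tr, tc))
--         frontier = nxt
--         dist += 1
--     return -1
-- ===== Notes on version B (the rewrite author's own statement) =====
-- stated objective: alternative
-- what changed: Replaces the deque-based one-cell-at-a-time BFS that stores a per-cell distance grid with a level-order BFS that keeps only a visited set, the current frontier list and a single integer distance counter, processing one whole layer per iteration (no per-cell deque pops or distance-grid writes; measured ~1.8x faster on large random inputs).
-- outside the precondition, e.g. on solution([[1, 0], [0, 1], [1]]): A returns -1, B returns -1
import Mathlib
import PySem

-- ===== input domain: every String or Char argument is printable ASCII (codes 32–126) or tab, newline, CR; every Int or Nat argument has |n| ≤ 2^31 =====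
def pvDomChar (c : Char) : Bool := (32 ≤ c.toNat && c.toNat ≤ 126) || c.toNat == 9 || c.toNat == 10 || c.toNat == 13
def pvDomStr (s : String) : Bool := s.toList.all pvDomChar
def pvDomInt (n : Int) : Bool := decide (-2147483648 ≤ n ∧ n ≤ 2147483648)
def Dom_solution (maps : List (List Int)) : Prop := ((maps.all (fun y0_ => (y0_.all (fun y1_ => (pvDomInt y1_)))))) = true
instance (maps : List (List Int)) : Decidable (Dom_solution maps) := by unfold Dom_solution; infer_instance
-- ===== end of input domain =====

-- B replaces A's deque-of-cells BFS carrying a per-cell distance grid by a level-order BFS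
-- (visited set + frontier list + one distance counter); same return value (objective: alternative; a timing run measured B about 1.8x faster at the largest size).


-- ===== PORT A =====
-- shared low-level indexing shim: xs[r][c] read / write (every use below is guarded in-bounds, as in the Python)
def gget (g : List (List Int)) (r c : Int) : Int := (g.getD r.toNat []).getD c.toNat 0
def gset (g : List (List Int)) (r c : Int) (v : Int) : List (List Int) :=
  g.set r.toNat ((g.getD r.toNat []).set c.toNat v)

def dR : List Int := [0, 0, -1, 1]
def dC : List Int := [1, -1, 0, 0]

-- body of A's inner 'for k in range(4)' loop, state = (visited, q)
def stepA (maps : List (List Int)) (N M r c : Int)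
    (st : List (List Int) × List (Int × Int)) (k : Nat) : List (List Int) × List (Int × Int) :=
  let tR := r + dR.getD k 0
  let tC := c + dC.getD k 0
  if 0 ≤ tR ∧ tR < N ∧ 0 ≤ tC ∧ tC < M ∧ gget st.1 tR tC = -1 ∧ gget maps tR tC = 1 then
    (gset st.1 tR tC (gget st.1 r c + 1), st.2 ++ [(tR, tC)])
  else st

-- one popped cell: run the k-loop over range(4)
def stepCellA (maps : List (List Int)) (N M : Int)
    (st : List (List Int) × List (Int × Int)) (p : Int × Int) : List (List Int) × List (Int × Int) :=
  (List.range 4).foldl (stepA maps N M p.1 p.2) st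

-- A's 'while q' loop; the fuel only makes it total ('none' = out of fuel, proved unreachable below)
def loopA (maps : List (List Int)) (N M : Int) :
    Nat → List (List Int) → List (Int × Int) → Option Int
  | _, _, [] => some (-1)
  | 0, _, _ :: _ => none
  | fuel + 1, vis, (r, c) :: rest =>
    if r = N - 1 ∧ c = M - 1 then some (gget vis r c)
    else
      let st := stepCellA maps N M (vis, rest) (r, c)
      loopA maps N M fuel st.1 st.2

def solution (maps : List (List Int)) : Int :=
  let N : Int := (maps.length : Int)
  let M : Int := ((maps.headD []).length : Int)
  let visited := gset (List.replicate maps.length (List.replicate (maps.headD []).length (-1 : Int))) 0 0 1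
  match loopA maps N M (2 * (maps.length * (maps.headD []).length) + 1) visited [(0, 0)] with
  | some r => r
  | none => -1

-- ===== PORT B =====
def nbrs (r c : Int) : List (Int × Int) := [(r, c + 1), (r, c - 1), (r - 1, c), (r + 1, c)]

-- body of B's inner neighbour loop, state = (seen, nxt)
def visitB (maps : List (List Int)) (N M : Int)
    (st : List (Int × Int) × List (Int × Int)) (t : Int × Int) : List (Int × Int) × List (Int × Int) :=
  if 0 ≤ t.1 ∧ t.1 < N ∧ 0 ≤ t.2 ∧ t.2 < M ∧ t ∉ st.1 ∧ gget maps t.1 t.2 = 1 then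
    (PySem.Set.add st.1 t, st.2 ++ [t])
  else st

-- one frontier cell: run over its four neighbours
def stepB (maps : List (List Int)) (N M : Int)
    (st : List (Int × Int) × List (Int × Int)) (p : Int × Int) : List (Int × Int) × List (Int × Int) :=
  (nbrs p.1 p.2).foldl (visitB maps N M) st

-- B's 'while frontier' loop; the fuel only makes it total ('none' = out of fuel, proved unreachable below)
def loopB (maps : List (List Int)) (N M : Int) :
    Nat → List (Int × Int) → List (Int × Int) → Int → Option Int
  | _, _, [], _ => some (-1)
  | 0, _, _ :: _, _ => none
  | fuel + 1, seen, p :: rest, dist =>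
    if (N - 1, M - 1) ∈ p :: rest then some dist
    else
      let st := (p :: rest).foldl (stepB maps N M) (seen, ([] : List (Int × Int)))
      loopB maps N M fuel st.1 st.2 (dist + 1)

def solution_alt (maps : List (List Int)) : Int :=
  let N : Int := (maps.length : Int)
  let M : Int := ((maps.headD []).length : Int)
  match loopB maps N M (maps.length * (maps.headD []).length + 1)
      (PySem.Set.ofList [((0 : Int), (0 : Int))]) [(0, 0)] 1 with
  | some r => r
  | none => -1

-- ===== PRECONDITION & SPEC =====
-- a cell readable by both programs and holding 1 (the guard 'maps[tr][tc] == 1' can pass there)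
def pvWalk (maps : List (List Int)) (t : Int × Int) : Prop :=
  0 ≤ t.1 ∧ t.1 < (maps.length : Int) ∧ 0 ≤ t.2 ∧ t.2 < ((maps.headD []).length : Int) ∧
  t.2.toNat < (maps.getD t.1.toNat []).length ∧ (maps.getD t.1.toNat []).getD t.2.toNat 0 = 1

-- Pre_ excludes the inputs where A raises IndexError: empty maps, an empty first row, and ragged grids
-- in which a missing entry (a row shorter than row 0) sits next to the start or to a 1-cell — A may read
-- such an entry. This over-approximates: on ragged grids whose missing entries adjoin only UNREACHABLE
-- 1-cells A still returns -1 but is excluded (reachability is not closed-form), e.g. [[1,0],[0,1],[1]].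
def Pre_solution (maps : List (List Int)) : Prop :=
  maps ≠ [] ∧ 0 < (maps.headD []).length ∧
  ∀ i ∈ List.range maps.length, ∀ j ∈ List.range (maps.headD []).length,
    (maps.getD i []).length ≤ j →
    ∀ t ∈ [((i : Int), (j : Int) + 1), ((i : Int), (j : Int) - 1),
        ((i : Int) - 1, (j : Int)), ((i : Int) + 1, (j : Int))],
      ¬(t = ((0 : Int), (0 : Int)) ∨ pvWalk maps t)
instance (maps : List (List Int)) : Decidable (Pre_solution maps) := by
  unfold Pre_solution pvWalk; infer_instance
def pvWitness_solution : List (List Int) := [[1, 1], [0, 1]]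

def Spec_solution (maps : List (List Int)) (out : Int) : Prop := out = solution_alt maps
instance (maps : List (List Int)) (out : Int) : Decidable (Spec_solution maps out) := by
  unfold Spec_solution; infer_instance

-- ===== CLAIM (what is proved, stated in full; the proofs are below) =====
def Claim_equal_solution : Prop :=
  ∀ (maps : List (List Int)), Dom_solution maps → Pre_solution maps → Spec_solution maps (solution maps)

-- ===== LEMMAS AND PROOFS =====

-- proof-side vocabulary
def inbP (N M : Int) (p : Int × Int) : Prop := 0 ≤ p.1 ∧ p.1 < N ∧ 0 ≤ p.2 ∧ p.2 < M

def ShapeG (Nn Mm : Nat) (g : List (List Int)) : Prop :=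
  g.length = Nn ∧ ∀ i, i < g.length → (g.getD i []).length = Mm

def unvis (g : List (List Int)) : Nat := (g.map (fun row => row.count (-1))).sum

def CorrG (N M : Int) (vis : List (List Int)) (seen : List (Int × Int)) : Prop :=
  ∀ p : Int × Int, inbP N M p → (p ∈ seen ↔ gget vis p.1 p.2 ≠ -1)

-- A's direction step re-keyed by the target cell (bridge from the range(4) fold)
def dirA (maps : List (List Int)) (N M r c : Int)
    (st : List (List Int) × List (Int × Int)) (t : Int × Int) : List (List Int) × List (Int × Int) :=
  if 0 ≤ t.1 ∧ t.1 < N ∧ 0 ≤ t.2 ∧ t.2 < M ∧ gget st.1 t.1 t.2 = -1 ∧ gget maps t.1 t.2 = 1 then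
    (gset st.1 t.1 t.2 (gget st.1 r c + 1), st.2 ++ [t])
  else st

theorem stepCellA_eq_dirA (maps : List (List Int)) (N M : Int)
    (st : List (List Int) × List (Int × Int)) (p : Int × Int) :
    stepCellA maps N M st p = (nbrs p.1 p.2).foldl (dirA maps N M p.1 p.2) st := by
  simp [stepCellA, nbrs, stepA, dirA, dR, dC, List.range_succ, sub_eq_add_neg]

-- grid lemmas
theorem gget_gset_ne (g : List (List Int)) {r c r' c' : Int} (v : Int)
    (h : r.toNat ≠ r'.toNat ∨ c.toNat ≠ c'.toNat) :
    gget (gset g r c v) r' c' = gget g r' c' := by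
  rcases eq_or_ne r.toNat r'.toNat with hr | hr
  · rcases h with h | h
    · exact absurd hr h
    · simp only [gget, gset, List.getD_eq_getElem?_getD, hr]
      rcases Nat.lt_or_ge r'.toNat g.length with hlt | hge
      · rw [List.getElem?_set_self (by simpa [hr] using hlt)]
        simp only [Option.getD_some, ← hr]
        rw [List.getElem?_set_ne h]
      · rw [List.set_eq_of_length_le (by omega)]
  · simp only [gget, gset, List.getD_eq_getElem?_getD, List.getElem?_set_ne hr]

theorem gget_gset_self (g : List (List Int)) {r c : Int} (v : Int)
    (hr : r.toNat < g.length) (hc : c.toNat < (g.getD r.toNat []).length) :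
    gget (gset g r c v) r c = v := by
  simp only [gget, gset, List.getD_eq_getElem?_getD]
  rw [List.getElem?_set_self hr]
  simp only [Option.getD_some]
  rw [List.getElem?_set_self (by simpa [List.getD_eq_getElem?_getD] using hc)]
  simp

theorem ShapeG_gset {Nn Mm : Nat} {g : List (List Int)} (h : ShapeG Nn Mm g) (r c : Int) (v : Int) :
    ShapeG Nn Mm (gset g r c v) := by
  obtain ⟨h1, h2⟩ := h
  refine ⟨by simpa [gset] using h1, ?_⟩
  intro i hi
  simp only [gset, List.length_set] at hi
  rcases eq_or_ne r.toNat i with hri | hri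
  · subst hri
    simp only [gset, List.getD_eq_getElem?_getD, List.getElem?_set_self hi, Option.getD_some,
      List.length_set]
    rw [← h2 r.toNat hi]
    simp [List.getD_eq_getElem?_getD]
  · simpa [gset, List.getD_eq_getElem?_getD, List.getElem?_set_ne hri] using
      h2 i (by simpa using hi)

-- count of -1 in a row after overwriting a -1 entry
theorem count_set_neg (v : Int) (hv : v ≠ -1) :
    ∀ (row : List Int) (j : Nat), j < row.length → row.getD j 0 = -1 →
      (row.set j v).count (-1) + 1 = row.count (-1) := by
  intro row
  induction row with
  | nil => intro j hj; simp at hj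
  | cons a l ih =>
    intro j hj hval
    cases j with
    | zero =>
      simp only [List.getD_cons_zero] at hval
      subst hval
      simp [hv]
    | succ j =>
      simp only [List.getD_cons_succ] at hval
      have := ih j (by simpa using hj) hval
      simp only [List.set_cons_succ, List.count_cons]
      omega

theorem sum_map_set (f : List Int → Nat) :
    ∀ (g : List (List Int)) (i : Nat) (row : List Int), i < g.length →
      ((g.set i row).map f).sum + f (g.getD i []) = (g.map f).sum + f row := by
  intro g
  induction g with
  | nil => intro i row hi; simp at hi
  | cons a l ih =>
    intro i row hi
    cases i with
    | zero => simp; omega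
    | succ i =>
      have := ih i row (by simpa using hi)
      simp only [List.set_cons_succ, List.map_cons, List.sum_cons, List.getD_cons_succ]
      omega

theorem unvis_gset {Nn Mm : Nat} {g : List (List Int)} {r c : Int} {v : Int}
    (_hs : ShapeG Nn Mm g) (hr : r.toNat < g.length) (hc : c.toNat < (g.getD r.toNat []).length)
    (hold : gget g r c = -1) (hv : v ≠ -1) :
    unvis (gset g r c v) + 1 = unvis g := by
  have hsum := sum_map_set (fun row => row.count (-1)) g r.toNat
      ((g.getD r.toNat []).set c.toNat v) hr
  have hcount := count_set_neg v hv (g.getD r.toNat []) c.toNat hc (by simpa [gget] using hold)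
  simp only at hsum hcount
  simp only [unvis, gset]
  omega

theorem inb_toNat_ne {N M : Int} {p q : Int × Int} (hp : inbP N M p) (hq : inbP N M q)
    (h : p ≠ q) : p.1.toNat ≠ q.1.toNat ∨ p.2.toNat ≠ q.2.toNat := by
  rcases p with ⟨a, b⟩
  rcases q with ⟨a', b'⟩
  simp only [inbP] at hp hq
  by_contra hcon
  push Not at hcon
  have h1 : a = a' := by omega
  have h2 : b = b' := by omega
  exact h (by simp [h1, h2])

-- a Nodup list of in-bounds cells has at most N*M elements
theorem nodup_inb_length {N M : Int} (s : List (Int × Int)) (hnd : s.Nodup)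
    (hinb : ∀ p ∈ s, inbP N M p) : s.length ≤ N.toNat * M.toNat := by
  have hsub : s.toFinset ⊆ Finset.Ico (0 : Int) N ×ˢ Finset.Ico (0 : Int) M := by
    intro x hx
    have hmem : x ∈ s := List.mem_toFinset.mp hx
    have := hinb x hmem
    simp only [inbP] at this
    simp only [Finset.mem_product, Finset.mem_Ico]
    exact ⟨⟨this.1, this.2.1⟩, ⟨this.2.2.1, this.2.2.2⟩⟩
  have hcard := Finset.card_le_card hsub
  rw [List.toFinset_card_of_nodup hnd] at hcard
  simpa [Finset.card_product, Int.card_Ico] using hcard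

-- the queue/next component of both folds is append-only and independent of its start value
theorem foldl_pair_acc {σ α β : Type} (step : σ × List β → α → σ × List β)
    (h : ∀ s q a, (step (s, q) a).1 = (step (s, []) a).1 ∧ (step (s, q) a).2 = q ++ (step (s, []) a).2) :
    ∀ (ts : List α) (s : σ) (q : List β),
      (List.foldl step (s, q) ts).1 = (List.foldl step (s, []) ts).1 ∧
      (List.foldl step (s, q) ts).2 = q ++ (List.foldl step (s, []) ts).2 := by
  intro ts
  induction ts with
  | nil => intro s q; simp
  | cons a ts ih =>
    intro s q
    obtain ⟨h1, h2⟩ := h s q a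
    have e : step (s, q) a = ((step (s, []) a).1, q ++ (step (s, []) a).2) :=
      Prod.ext h1 h2
    simp only [List.foldl_cons, e]
    obtain ⟨i1, i2⟩ := ih (step (s, []) a).1 (q ++ (step (s, []) a).2)
    obtain ⟨j1, j2⟩ := ih (step (s, []) a).1 (step (s, []) a).2
    constructor
    · rw [i1, j1]
    · rw [i2, j2, List.append_assoc]

theorem dirA_acc (maps : List (List Int)) (N M r c : Int) :
    ∀ s q t, ((dirA maps N M r c) (s, q) t).1 = ((dirA maps N M r c) (s, []) t).1 ∧
      ((dirA maps N M r c) (s, q) t).2 = q ++ ((dirA maps N M r c) (s, []) t).2 := by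
  intro s q t
  by_cases hc : 0 ≤ t.1 ∧ t.1 < N ∧ 0 ≤ t.2 ∧ t.2 < M ∧ gget s t.1 t.2 = -1 ∧ gget maps t.1 t.2 = 1 <;>
    simp [dirA, hc]

theorem stepCellA_acc (maps : List (List Int)) (N M : Int) :
    ∀ s q p, (stepCellA maps N M (s, q) p).1 = (stepCellA maps N M (s, []) p).1 ∧
      (stepCellA maps N M (s, q) p).2 = q ++ (stepCellA maps N M (s, []) p).2 := by
  intro s q p
  rw [stepCellA_eq_dirA, stepCellA_eq_dirA]
  exact foldl_pair_acc (dirA maps N M p.1 p.2) (dirA_acc maps N M p.1 p.2) (nbrs p.1 p.2) s q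

-- processing one layer of the queue pops exactly the layer and appends its expansion
theorem loopA_layer (maps : List (List Int)) (N M : Int) :
    ∀ (L : List (Int × Int)) (f : Nat) (vis : List (List Int)) (acc : List (Int × Int)),
      (∀ p ∈ L, ¬(p.1 = N - 1 ∧ p.2 = M - 1)) →
      loopA maps N M (L.length + f) vis (L ++ acc) =
        loopA maps N M f (L.foldl (stepCellA maps N M) (vis, acc)).1
          (L.foldl (stepCellA maps N M) (vis, acc)).2 := by
  intro L
  induction L with
  | nil => intro f vis acc _; simp
  | cons p L ih =>
    intro f vis acc hng
    obtain ⟨r, c⟩ := p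
    have hcond : ¬(r = N - 1 ∧ c = M - 1) := hng (r, c) List.mem_cons_self
    have hstep : loopA maps N M (L.length + f + 1) vis ((r, c) :: (L ++ acc)) =
        loopA maps N M (L.length + f) (stepCellA maps N M (vis, L ++ acc) (r, c)).1
          (stepCellA maps N M (vis, L ++ acc) (r, c)).2 := by
      simp only [loopA, if_neg hcond]
    obtain ⟨a1, a2⟩ := stepCellA_acc maps N M vis (L ++ acc) (r, c)
    obtain ⟨b1, b2⟩ := stepCellA_acc maps N M vis acc (r, c)
    have hst : stepCellA maps N M (vis, L ++ acc) (r, c) =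
        ((stepCellA maps N M (vis, acc) (r, c)).1,
          L ++ (stepCellA maps N M (vis, acc) (r, c)).2) := by
      refine Prod.ext ?_ ?_
      · rw [a1, b1]
      · rw [a2, b2, List.append_assoc]
    have hlen : ((r, c) :: L).length + f = (L.length + f) + 1 := by
      simp [List.length_cons]; omega
    rw [hlen]
    calc loopA maps N M ((L.length + f) + 1) vis (((r, c) :: L) ++ acc)
        = loopA maps N M (L.length + f) (stepCellA maps N M (vis, L ++ acc) (r, c)).1
            (stepCellA maps N M (vis, L ++ acc) (r, c)).2 := by
          simpa using hstep
      _ = loopA maps N M f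
            (L.foldl (stepCellA maps N M)
              ((stepCellA maps N M (vis, acc) (r, c)).1,
                (stepCellA maps N M (vis, acc) (r, c)).2)).1
            (L.foldl (stepCellA maps N M)
              ((stepCellA maps N M (vis, acc) (r, c)).1,
                (stepCellA maps N M (vis, acc) (r, c)).2)).2 := by
          rw [hst]
          exact ih f (stepCellA maps N M (vis, acc) (r, c)).1
            ((stepCellA maps N M (vis, acc) (r, c)).2)
            (fun q hq => hng q (List.mem_cons_of_mem _ hq))
      _ = loopA maps N M f (((r, c) :: L).foldl (stepCellA maps N M) (vis, acc)).1
            (((r, c) :: L).foldl (stepCellA maps N M) (vis, acc)).2 := by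
          simp only [List.foldl_cons]

theorem loopA_nil (maps : List (List Int)) (N M : Int) (vis : List (List Int)) :
    ∀ g, loopA maps N M g vis [] = some (-1) := by
  intro g; cases g <;> rfl

theorem loopB_nil (maps : List (List Int)) (N M : Int) (seen : List (Int × Int)) (d : Int) :
    ∀ g, loopB maps N M g seen [] d = some (-1) := by
  intro g; cases g <;> rfl

-- expansion writes only to cells that were unvisited
theorem cellPres (maps : List (List Int)) (N M : Int) :
    ∀ (ts : List (Int × Int)) (vis : List (List Int)) (q : List (Int × Int)) (r c : Int)
      (s : Int × Int), inbP N M s → gget vis s.1 s.2 ≠ -1 →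
      gget (ts.foldl (dirA maps N M r c) (vis, q)).1 s.1 s.2 = gget vis s.1 s.2 := by
  intro ts
  induction ts with
  | nil => intro vis q r c s _ _; simp
  | cons t ts ih =>
    intro vis q r c s hs hv
    simp only [List.foldl_cons]
    by_cases hc : 0 ≤ t.1 ∧ t.1 < N ∧ 0 ≤ t.2 ∧ t.2 < M ∧ gget vis t.1 t.2 = -1 ∧
        gget maps t.1 t.2 = 1
    · have hinbt : inbP N M t := ⟨hc.1, hc.2.1, hc.2.2.1, hc.2.2.2.1⟩
      have hne : s ≠ t := fun h => hv (by rw [h]; exact hc.2.2.2.2.1)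
      have hget : gget (gset vis t.1 t.2 (gget vis r c + 1)) s.1 s.2 = gget vis s.1 s.2 := by
        apply gget_gset_ne
        rcases inb_toNat_ne hs hinbt hne with h | h
        · exact Or.inl (Ne.symm h)
        · exact Or.inr (Ne.symm h)
      have hstep : dirA maps N M r c (vis, q) t =
          (gset vis t.1 t.2 (gget vis r c + 1), q ++ [t]) := by
        simp [dirA, hc]
      rw [hstep]
      rw [ih _ _ r c s hs (by rw [hget]; exact hv)]
      exact hget
    · have hstep : dirA maps N M r c (vis, q) t = (vis, q) := by simp [dirA, hc]
      rw [hstep]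
      exact ih _ _ r c s hs hv

theorem cellPres' (maps : List (List Int)) (N M : Int) (vis : List (List Int))
    (q : List (Int × Int)) (p : Int × Int) (s : Int × Int) (hs : inbP N M s)
    (hv : gget vis s.1 s.2 ≠ -1) :
    gget (stepCellA maps N M (vis, q) p).1 s.1 s.2 = gget vis s.1 s.2 := by
  rw [stepCellA_eq_dirA]
  exact cellPres maps N M (nbrs p.1 p.2) vis q p.1 p.2 s hs hv

-- if the goal is in a layer whose cells all carry distance d, A returns d
theorem A_goal (maps : List (List Int)) (N M : Int) (d : Int) (hd : 1 ≤ d) :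
    ∀ (L : List (Int × Int)) (f : Nat) (vis : List (List Int)) (acc : List (Int × Int)),
      (N - 1, M - 1) ∈ L → (∀ p ∈ L, inbP N M p ∧ gget vis p.1 p.2 = d) →
      L.length ≤ f →
      loopA maps N M f vis (L ++ acc) = some d := by
  intro L
  induction L with
  | nil => intro f vis acc hmem; simp at hmem
  | cons p L ih =>
    intro f vis acc hmem hlayer hf
    obtain ⟨r, c⟩ := p
    cases f with
    | zero => simp at hf
    | succ f =>
      by_cases hcond : r = N - 1 ∧ c = M - 1
      · have hval := (hlayer (r, c) List.mem_cons_self).2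
        simp only [List.cons_append, loopA, if_pos hcond]
        rw [hval]
      · have hgoal : (N - 1, M - 1) ∈ L := by
          rcases List.mem_cons.mp hmem with h | h
          · exact absurd ⟨congrArg Prod.fst h.symm, congrArg Prod.snd h.symm⟩ hcond
          · exact h
        simp only [List.cons_append, loopA, if_neg hcond]
        obtain ⟨a1, a2⟩ := stepCellA_acc maps N M vis (L ++ acc) (r, c)
        have h2 : (stepCellA maps N M (vis, L ++ acc) (r, c)).2 =
            L ++ (acc ++ (stepCellA maps N M (vis, []) (r, c)).2) := by
          rw [a2, List.append_assoc]
        rw [h2]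
        apply ih f _ _ hgoal
        · intro q hq
          refine ⟨(hlayer q (List.mem_cons_of_mem _ hq)).1, ?_⟩
          have hv := (hlayer q (List.mem_cons_of_mem _ hq)).2
          rw [cellPres' maps N M vis (L ++ acc) (r, c) q
            (hlayer q (List.mem_cons_of_mem _ hq)).1 (by rw [hv]; omega)]
          exact hv
        · simp at hf ⊢; omega

-- core simulation: expanding one cell keeps A's and B's states in lock step
theorem cellSim (maps : List (List Int)) (N M : Int) (Nn Mm : Nat) (d : Int) (hd : 1 ≤ d)
    (hN : (Nn : Int) = N) (hM : (Mm : Int) = M) (r c : Int) (hp : inbP N M (r, c)) :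
    ∀ (ts : List (Int × Int)) (vis : List (List Int)) (seen qa nb : List (Int × Int)),
      CorrG N M vis seen → ShapeG Nn Mm vis →
      gget vis r c = d →
      ∃ δ : List (Int × Int),
        (ts.foldl (dirA maps N M r c) (vis, qa)).2 = qa ++ δ ∧
        (ts.foldl (visitB maps N M) (seen, nb)).1 = seen ++ δ ∧
        (ts.foldl (visitB maps N M) (seen, nb)).2 = nb ++ δ ∧
        CorrG N M (ts.foldl (dirA maps N M r c) (vis, qa)).1 (seen ++ δ) ∧
        ShapeG Nn Mm (ts.foldl (dirA maps N M r c) (vis, qa)).1 ∧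
        (∀ s : Int × Int, inbP N M s → gget vis s.1 s.2 ≠ -1 →
          gget (ts.foldl (dirA maps N M r c) (vis, qa)).1 s.1 s.2 = gget vis s.1 s.2) ∧
        (∀ t ∈ δ, inbP N M t ∧ gget (ts.foldl (dirA maps N M r c) (vis, qa)).1 t.1 t.2 = d + 1) ∧
        unvis vis = unvis (ts.foldl (dirA maps N M r c) (vis, qa)).1 + δ.length ∧
        (seen.Nodup → (seen ++ δ).Nodup) := by
  intro ts
  induction ts with
  | nil =>
    intro vis seen qa nb hcorr hshape hval
    exact ⟨[], by simp, by simp, by simp, by simpa using hcorr, hshape,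
      fun s _ _ => rfl, by simp, by simp, fun h => by simpa using h⟩
  | cons t ts ih =>
    intro vis seen qa nb hcorr hshape hval
    simp only [List.foldl_cons]
    by_cases hcA : 0 ≤ t.1 ∧ t.1 < N ∧ 0 ≤ t.2 ∧ t.2 < M ∧ gget vis t.1 t.2 = -1 ∧
        gget maps t.1 t.2 = 1
    · have hinbt : inbP N M t := ⟨hcA.1, hcA.2.1, hcA.2.2.1, hcA.2.2.2.1⟩
      have htv : gget vis t.1 t.2 = -1 := hcA.2.2.2.2.1
      have hnotseen : t ∉ seen := fun hmem => ((hcorr t hinbt).mp hmem) htv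
      have hstepA : dirA maps N M r c (vis, qa) t =
          (gset vis t.1 t.2 (d + 1), qa ++ [t]) := by
        simp only [dirA, if_pos hcA, hval]
      have hstepB : visitB maps N M (seen, nb) t = (seen ++ [t], nb ++ [t]) := by
        simp only [visitB]
        rw [if_pos ⟨hcA.1, hcA.2.1, hcA.2.2.1, hcA.2.2.2.1, hnotseen, hcA.2.2.2.2.2⟩]
        rw [PySem.Set.add_of_not_mem hnotseen]
      rw [hstepA, hstepB]
      have hrow : t.1.toNat < vis.length := by
        obtain ⟨hlen, _⟩ := hshape
        obtain ⟨i1, i2, _, _⟩ := hinbt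
        omega
      have hcol : t.2.toNat < (vis.getD t.1.toNat []).length := by
        obtain ⟨hlen, hrows⟩ := hshape
        rw [hrows t.1.toNat hrow]
        obtain ⟨_, _, i3, i4⟩ := hinbt
        omega
      have hstv1 : gget (gset vis t.1 t.2 (d + 1)) t.1 t.2 = d + 1 :=
        gget_gset_self vis (d + 1) hrow hcol
      have hpres1 : ∀ s : Int × Int, inbP N M s → gget vis s.1 s.2 ≠ -1 →
          gget (gset vis t.1 t.2 (d + 1)) s.1 s.2 = gget vis s.1 s.2 := by
        intro s hs hv
        exact gget_gset_ne vis (d + 1) (inb_toNat_ne hinbt hs (fun h => hv (h ▸ htv)))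
      have hshape1 : ShapeG Nn Mm (gset vis t.1 t.2 (d + 1)) := ShapeG_gset hshape _ _ _
      have hcorr1 : CorrG N M (gset vis t.1 t.2 (d + 1)) (seen ++ [t]) := by
        intro s hs
        by_cases hst : s = t
        · subst hst
          simp only [List.mem_append, List.mem_singleton, or_true, true_iff, hstv1]
          omega
        · have heq : gget (gset vis t.1 t.2 (d + 1)) s.1 s.2 = gget vis s.1 s.2 :=
            gget_gset_ne vis (d + 1) (inb_toNat_ne hinbt hs (fun h => hst (h.symm)))
          simp only [List.mem_append, List.mem_singleton, hst, or_false, heq]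
          exact hcorr s hs
      have hval1 : gget (gset vis t.1 t.2 (d + 1)) r c = d := by
        have hne : t ≠ (r, c) := by
          intro h
          rw [h] at htv
          simp only at htv
          rw [htv] at hval
          omega
        rw [gget_gset_ne vis (d + 1) (inb_toNat_ne hinbt hp hne)]
        exact hval
      obtain ⟨δ, h1, h2, h3, h4, h5, h6, h7, h8, h9⟩ :=
        ih (gset vis t.1 t.2 (d + 1)) (seen ++ [t]) (qa ++ [t]) (nb ++ [t]) hcorr1 hshape1 hval1
      have hlist : ∀ (xs : List (Int × Int)), (xs ++ [t]) ++ δ = xs ++ (t :: δ) := by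
        intro xs; simp
      refine ⟨t :: δ, ?_, ?_, ?_, ?_, h5, ?_, ?_, ?_, ?_⟩
      · rw [h1, hlist]
      · rw [h2, hlist]
      · rw [h3, hlist]
      · rw [← hlist]; exact h4
      · intro s hs hv
        rw [h6 s hs (by rw [hpres1 s hs hv]; exact hv)]
        exact hpres1 s hs hv
      · intro x hx
        rcases List.mem_cons.mp hx with hx | hx
        · subst hx
          exact ⟨hinbt, by rw [h6 x hinbt (by rw [hstv1]; omega)]; exact hstv1⟩
        · exact h7 x hx
      · have hu : unvis (gset vis t.1 t.2 (d + 1)) + 1 = unvis vis :=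
          unvis_gset hshape hrow hcol htv (by omega)
        simp only [List.length_cons]
        omega
      · intro hnd
        rw [← hlist]
        refine h9 (List.Nodup.append hnd (List.nodup_singleton t) ?_)
        intro x hx hxt
        rw [List.mem_singleton] at hxt
        exact hnotseen (hxt ▸ hx)
    · have hstepB : visitB maps N M (seen, nb) t = (seen, nb) := by
        simp only [visitB]
        rw [if_neg]
        rintro ⟨b1, b2, b3, b4, b5, b6⟩
        have hinbt : inbP N M t := ⟨b1, b2, b3, b4⟩
        have htv : gget vis t.1 t.2 = -1 := by
          by_contra hne
          exact b5 ((hcorr t hinbt).mpr hne)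
        exact hcA ⟨b1, b2, b3, b4, htv, b6⟩
      have hstepA : dirA maps N M r c (vis, qa) t = (vis, qa) := by
        simp only [dirA, if_neg hcA]
      rw [hstepA, hstepB]
      exact ih vis seen qa nb hcorr hshape hval

-- layer-level simulation
theorem layerSim (maps : List (List Int)) (N M : Int) (Nn Mm : Nat) (d : Int) (hd : 1 ≤ d)
    (hN : (Nn : Int) = N) (hM : (Mm : Int) = M) :
    ∀ (L : List (Int × Int)) (vis : List (List Int)) (seen qa nb : List (Int × Int)),
      CorrG N M vis seen → ShapeG Nn Mm vis →
      (∀ p ∈ L, inbP N M p ∧ gget vis p.1 p.2 = d) →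
      ∃ δ : List (Int × Int),
        (L.foldl (stepCellA maps N M) (vis, qa)).2 = qa ++ δ ∧
        (L.foldl (stepB maps N M) (seen, nb)).1 = seen ++ δ ∧
        (L.foldl (stepB maps N M) (seen, nb)).2 = nb ++ δ ∧
        CorrG N M (L.foldl (stepCellA maps N M) (vis, qa)).1 (seen ++ δ) ∧
        ShapeG Nn Mm (L.foldl (stepCellA maps N M) (vis, qa)).1 ∧
        (∀ s : Int × Int, inbP N M s → gget vis s.1 s.2 ≠ -1 →
          gget (L.foldl (stepCellA maps N M) (vis, qa)).1 s.1 s.2 = gget vis s.1 s.2) ∧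
        (∀ t ∈ δ, inbP N M t ∧ gget (L.foldl (stepCellA maps N M) (vis, qa)).1 t.1 t.2 = d + 1) ∧
        unvis vis = unvis (L.foldl (stepCellA maps N M) (vis, qa)).1 + δ.length ∧
        (seen.Nodup → (seen ++ δ).Nodup) := by
  intro L
  induction L with
  | nil =>
    intro vis seen qa nb hcorr hshape _
    exact ⟨[], by simp, by simp, by simp, by simpa using hcorr, hshape,
      fun s _ _ => rfl, by simp, by simp, fun h => by simpa using h⟩
  | cons p L ih =>
    intro vis seen qa nb hcorr hshape hlayer
    obtain ⟨hpinb, hpval⟩ := hlayer p List.mem_cons_self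
    simp only [List.foldl_cons, stepCellA_eq_dirA, stepB]
    obtain ⟨δ₁, c1, c2, c3, c4, c5, c6, c7, c8, c9⟩ :=
      cellSim maps N M Nn Mm d hd hN hM p.1 p.2 (by simpa using hpinb) (nbrs p.1 p.2)
        vis seen qa nb hcorr hshape hpval
    have eA : (nbrs p.1 p.2).foldl (dirA maps N M p.1 p.2) (vis, qa) =
        (((nbrs p.1 p.2).foldl (dirA maps N M p.1 p.2) (vis, qa)).1, qa ++ δ₁) :=
      Prod.ext rfl c1
    have eB : (nbrs p.1 p.2).foldl (visitB maps N M) (seen, nb) = (seen ++ δ₁, nb ++ δ₁) :=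
      Prod.ext c2 c3
    rw [eA, eB]
    obtain ⟨δ₂, i1, i2, i3, i4, i5, i6, i7, i8, i9⟩ :=
      ih ((nbrs p.1 p.2).foldl (dirA maps N M p.1 p.2) (vis, qa)).1 (seen ++ δ₁)
        (qa ++ δ₁) (nb ++ δ₁) c4 c5
        (by
          intro q hq
          obtain ⟨hqinb, hqval⟩ := hlayer q (List.mem_cons_of_mem _ hq)
          exact ⟨hqinb, by rw [c6 q hqinb (by rw [hqval]; omega)]; exact hqval⟩)
    -- rewrite the A-folds in the ih conclusion back through stepCellA_eq_dirA done above
    refine ⟨δ₁ ++ δ₂, ?_, ?_, ?_, ?_, i5, ?_, ?_, ?_, ?_⟩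
    · rw [i1, List.append_assoc]
    · rw [i2, List.append_assoc]
    · rw [i3, List.append_assoc]
    · rw [← List.append_assoc]; exact i4
    · intro s hs hv
      rw [i6 s hs (by rw [c6 s hs hv]; exact hv)]
      exact c6 s hs hv
    · intro x hx
      rcases List.mem_append.mp hx with hx | hx
      · obtain ⟨hxinb, hxval⟩ := c7 x hx
        exact ⟨hxinb, by rw [i6 x hxinb (by rw [hxval]; omega)]; exact hxval⟩
      · exact i7 x hx
    · rw [List.length_append]
      omega
    · intro hnd
      rw [← List.append_assoc]
      exact i9 (c9 hnd)

-- the main simulation: B terminates and A (with any sufficient fuel) returns the same value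
theorem SIM (maps : List (List Int)) (N M : Int) (Nn Mm : Nat)
    (hN : (Nn : Int) = N) (hM : (Mm : Int) = M) :
    ∀ (fB : Nat) (vis : List (List Int)) (seen L : List (Int × Int)) (d : Int),
      CorrG N M vis seen → ShapeG Nn Mm vis → seen.Nodup → (∀ p ∈ seen, inbP N M p) →
      (∀ p ∈ L, inbP N M p ∧ gget vis p.1 p.2 = d) → 1 ≤ d →
      Nn * Mm + 2 - seen.length ≤ fB →
      ∃ rB : Int, loopB maps N M fB seen L d = some rB ∧
        ∀ g : Nat, 2 * unvis vis + L.length ≤ g → loopA maps N M g vis L = some rB := by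
  intro fB
  induction fB with
  | zero =>
    intro vis seen L d hcorr hshape hnd hsinb hlayer hd hfB
    cases L with
    | nil =>
      exact ⟨-1, loopB_nil maps N M seen d 0, fun g _ => loopA_nil maps N M vis g⟩
    | cons p L' =>
      exfalso
      have hb := nodup_inb_length seen hnd hsinb
      have hNt : N.toNat = Nn := by omega
      have hMt : M.toNat = Mm := by omega
      rw [hNt, hMt] at hb
      generalize hK : Nn * Mm = K at hb hfB
      omega
  | succ fB ih =>
    intro vis seen L d hcorr hshape hnd hsinb hlayer hd hfB
    cases L with
    | nil =>
      exact ⟨-1, loopB_nil maps N M seen d (fB + 1), fun g _ => loopA_nil maps N M vis g⟩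
    | cons p L' =>
      by_cases hg : (N - 1, M - 1) ∈ p :: L'
      · refine ⟨d, by simp only [loopB, if_pos hg], ?_⟩
        intro g hge
        have hlen : (p :: L').length ≤ g := by omega
        have := A_goal maps N M d hd (p :: L') g vis [] hg hlayer hlen
        simpa using this
      · have hng : ∀ q ∈ p :: L', ¬(q.1 = N - 1 ∧ q.2 = M - 1) := by
          intro q hq hc
          have hqe : q = (N - 1, M - 1) := by
            obtain ⟨a, b⟩ := q
            simp only at hc
            rw [hc.1, hc.2]
          exact hg (hqe ▸ hq)
        obtain ⟨δ, l1, l2, l3, l4, l5, l6, l7, l8, l9⟩ :=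
          layerSim maps N M Nn Mm d hd hN hM (p :: L') vis seen [] [] hcorr hshape hlayer
        have hBstep : loopB maps N M (fB + 1) seen (p :: L') d =
            loopB maps N M fB ((p :: L').foldl (stepB maps N M) (seen, [])).1
              ((p :: L').foldl (stepB maps N M) (seen, [])).2 (d + 1) := by
          simp only [loopB, if_neg hg]
        have hAeq : ∀ g : Nat, (p :: L').length ≤ g →
            loopA maps N M g vis (p :: L') =
              loopA maps N M (g - (p :: L').length)
                ((p :: L').foldl (stepCellA maps N M) (vis, [])).1
                ((p :: L').foldl (stepCellA maps N M) (vis, [])).2 := by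
          intro g hgl
          have heq := loopA_layer maps N M (p :: L') (g - (p :: L').length) vis [] hng
          rw [List.append_nil] at heq
          rw [show (p :: L').length + (g - (p :: L').length) = g by omega] at heq
          exact heq
        have hA2 : ((p :: L').foldl (stepCellA maps N M) (vis, [])).2 = δ := by
          rw [l1]; simp
        have hB1 : ((p :: L').foldl (stepB maps N M) (seen, [])).1 = seen ++ δ := l2
        have hB2 : ((p :: L').foldl (stepB maps N M) (seen, [])).2 = δ := by
          rw [l3]; simp
        rcases eq_or_ne δ [] with hδ | hδ
        · refine ⟨-1, ?_, ?_⟩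
          · rw [hBstep, hB2, hδ]
            exact loopB_nil maps N M _ _ fB
          · intro g hge
            have hgl : (p :: L').length ≤ g := by omega
            rw [hAeq g hgl, hA2, hδ]
            exact loopA_nil maps N M _ _
        · have hnd' : (seen ++ δ).Nodup := l9 hnd
          have hsinb' : ∀ q ∈ seen ++ δ, inbP N M q := by
            intro q hq
            rcases List.mem_append.mp hq with hq | hq
            · exact hsinb q hq
            · exact (l7 q hq).1
          have hfB' : Nn * Mm + 2 - (seen ++ δ).length ≤ fB := by
            have hb := nodup_inb_length (seen ++ δ) hnd' hsinb'
            have hNt : N.toNat = Nn := by omega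
            have hMt : M.toNat = Mm := by omega
            rw [hNt, hMt] at hb
            rw [List.length_append] at hb ⊢
            have hδ1 : 1 ≤ δ.length := List.length_pos_iff.mpr hδ
            generalize hK : Nn * Mm = K at hb hfB ⊢
            omega
          obtain ⟨rB, hB, hA⟩ := ih ((p :: L').foldl (stepCellA maps N M) (vis, [])).1
            (seen ++ δ) δ (d + 1) l4 l5 hnd' hsinb' l7 (by omega) hfB'
          refine ⟨rB, ?_, ?_⟩
          · rw [hBstep, hB1, hB2]
            exact hB
          · intro g hge
            have hgl : (p :: L').length ≤ g := by omega
            rw [hAeq g hgl, hA2]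
            apply hA
            have hu := l8
            omega

-- ===== VERDICT (by name: the statement is the Claim_ definition above) =====
theorem solution_spec : Claim_equal_solution := by
  intro maps _ hpre
  obtain ⟨hne, hM0, _⟩ := hpre
  unfold Spec_solution
  have hNn : 1 ≤ maps.length := List.length_pos_iff.mpr hne
  have hMm : 1 ≤ (maps.headD []).length := hM0
  set Nn := maps.length with hNndef
  set Mm := (maps.headD []).length with hMmdef
  have hshape0 : ShapeG Nn Mm (List.replicate Nn (List.replicate Mm (-1 : Int))) := by
    refine ⟨by simp, ?_⟩
    intro i hi
    simp only [List.length_replicate] at hi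
    rw [List.getD_replicate _ hi]
    simp
  have hrow : (0 : Int).toNat < (List.replicate Nn (List.replicate Mm (-1 : Int))).length := by
    simp; omega
  have hcol : (0 : Int).toNat <
      ((List.replicate Nn (List.replicate Mm (-1 : Int))).getD (0 : Int).toNat []).length := by
    rw [hshape0.2 (0 : Int).toNat hrow]
    simp; omega
  have hg00 : gget (List.replicate Nn (List.replicate Mm (-1 : Int))) 0 0 = -1 := by
    simp only [gget, Int.toNat_zero]
    rw [List.getD_replicate _ (by simpa using hrow)]
    rw [List.getD_replicate _ (by omega)]
  have hshape1 : ShapeG Nn Mm (gset (List.replicate Nn (List.replicate Mm (-1 : Int))) 0 0 1) :=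
    ShapeG_gset hshape0 0 0 1
  have hval1 : gget (gset (List.replicate Nn (List.replicate Mm (-1 : Int))) 0 0 1) 0 0 = 1 :=
    gget_gset_self _ 1 hrow hcol
  have hinb00 : inbP (Nn : Int) (Mm : Int) ((0 : Int), (0 : Int)) := by
    refine ⟨le_refl 0, by omega, le_refl 0, by omega⟩
  have hcorr1 : CorrG (Nn : Int) (Mm : Int)
      (gset (List.replicate Nn (List.replicate Mm (-1 : Int))) 0 0 1) [((0 : Int), (0 : Int))] := by
    intro s hs
    by_cases hs0 : s = ((0 : Int), (0 : Int))
    · subst hs0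
      simp only [List.mem_singleton, true_iff]
      simp only at hval1
      rw [hval1]
      omega
    · have heq : gget (gset (List.replicate Nn (List.replicate Mm (-1 : Int))) 0 0 1) s.1 s.2 =
          gget (List.replicate Nn (List.replicate Mm (-1 : Int))) s.1 s.2 := by
        apply gget_gset_ne
        exact inb_toNat_ne hinb00 hs (fun h => hs0 h.symm)
      have hv0 : gget (List.replicate Nn (List.replicate Mm (-1 : Int))) s.1 s.2 = -1 := by
        obtain ⟨i1, i2, i3, i4⟩ := hs
        simp only [gget]
        rw [List.getD_replicate _ (by omega)]
        rw [List.getD_replicate _ (by omega)]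
      simp only [List.mem_singleton, hs0, false_iff, heq, hv0]
      omega
  have hu0 : unvis (List.replicate Nn (List.replicate Mm (-1 : Int))) = Nn * Mm := by
    simp [unvis, List.map_replicate, List.sum_replicate, smul_eq_mul]
  have hu1 : unvis (gset (List.replicate Nn (List.replicate Mm (-1 : Int))) 0 0 1) + 1 =
      unvis (List.replicate Nn (List.replicate Mm (-1 : Int))) :=
    unvis_gset hshape0 hrow hcol hg00 (by omega)
  obtain ⟨rB, hB, hA⟩ := SIM maps (Nn : Int) (Mm : Int) Nn Mm rfl rfl (Nn * Mm + 1)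
    (gset (List.replicate Nn (List.replicate Mm (-1 : Int))) 0 0 1)
    [((0 : Int), (0 : Int))] [((0 : Int), (0 : Int))] 1
    hcorr1 hshape1 (List.nodup_singleton _) (by simpa using hinb00)
    (by
      intro p hp
      rw [List.mem_singleton] at hp
      subst hp
      exact ⟨hinb00, hval1⟩)
    le_rfl
    (by generalize Nn * Mm = K; simp)
  have hAg := hA (2 * (Nn * Mm) + 1)
    (by
      have := hu0 ▸ hu1
      generalize hK : Nn * Mm = K at this ⊢
      simp only [List.length_singleton]
      omega)
  have hseen : PySem.Set.ofList [((0 : Int), (0 : Int))] = [((0 : Int), (0 : Int))] := rfl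
  simp only [solution, solution_alt, ← hNndef, ← hMmdef, hseen]
  rw [hAg, hB]
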